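-- pv_equiv track=rewrite | github.com/spacegoing/Gym | resources_servers/turing_vif/vif_validators/de/validator.py | is_first_letter_cap
-- ===== SOURCE A (Python) =====
-- def is_first_letter_cap(token: str) -> bool:
--     first_alpha_seen = False
--     first = token[0]
--     if first.isdigit():
--         return all((not ch.isalpha()) or ch.islower() for ch in token[1:])
--     if len(token) == 1:
--         if token.isalpha():
--             return first.isupper()
--         else:
--             return True
--
--     for ch in token:
--         if ch.isalpha():
--             if not first_alpha_seen:
--                 if not ch.isupper():
--                     return False
--                 first_alpha_seen = True
--             else:
--                 if not ch.islower():
--                     return False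
--     return True
-- ===== SOURCE B (Python) =====
-- def is_first_letter_cap(token: str) -> bool:
--     first = token[0]
--     letters = [ch for ch in token if ch.isalpha()]
--     if first.isdigit():
--         return all(ch.islower() for ch in letters)
--     if not letters:
--         return True
--     return letters[0].isupper() and all(ch.islower() for ch in letters[1:])
-- ===== Notes on version B (the rewrite author's own statement) =====
-- stated objective: simpler
-- what changed: Replaces the stateful single-letter-flag scan with three special-cased branches by one extract-the-letters filtering pass followed by a positional check (first letter upper, rest lower), collapsing the len==1 branch into the general case.
import Mathlib
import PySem

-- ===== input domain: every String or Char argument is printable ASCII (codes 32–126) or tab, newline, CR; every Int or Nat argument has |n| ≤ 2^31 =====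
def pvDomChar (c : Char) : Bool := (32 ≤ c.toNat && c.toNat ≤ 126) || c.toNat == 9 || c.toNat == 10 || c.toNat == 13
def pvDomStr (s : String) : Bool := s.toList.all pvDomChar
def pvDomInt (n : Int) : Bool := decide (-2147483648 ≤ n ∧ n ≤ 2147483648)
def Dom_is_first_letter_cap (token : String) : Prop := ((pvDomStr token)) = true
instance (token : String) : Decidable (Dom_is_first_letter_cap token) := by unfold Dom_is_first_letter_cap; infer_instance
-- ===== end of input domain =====

-- B changes A's stateful first-letter-flag scan into a filter-the-letters pass plus a positional
-- check (first letter upper, rest lower); same cost, simpler decomposition.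

-- ===== PORT A =====
-- the for-loop of A with its first_alpha_seen flag and early returns
def pvALoop : List Char → Bool → Bool
  | [], _ => true
  | ch :: t, seen =>
    if PySem.Chars.isalpha ch then
      if !seen then
        if !PySem.Chars.isupper ch then false else pvALoop t true
      else
        if !PySem.Chars.islower ch then false else pvALoop t seen
    else pvALoop t seen

def is_first_letter_cap (token : String) : Bool :=
  match token.toList with
  | [] => false   -- token[0] raises IndexError: excluded by Pre_
  | first :: rest =>
    if PySem.Chars.isdigit first then
      -- all((not ch.isalpha()) or ch.islower() for ch in token[1:])
      rest.all (fun ch => !PySem.Chars.isalpha ch || PySem.Chars.islower ch)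
    else if rest.isEmpty then
      if PySem.Chars.strIsalpha token.toList then PySem.Chars.isupper first else true
    else
      pvALoop (first :: rest) false

-- ===== PORT B =====
def is_first_letter_cap_alt (token : String) : Bool :=
  match token.toList with
  | [] => false   -- token[0] raises IndexError: excluded by Pre_
  | first :: rest =>
    let letters := (first :: rest).filter PySem.Chars.isalpha
    if PySem.Chars.isdigit first then
      letters.all PySem.Chars.islower
    else
      match letters with
      | [] => true
      | l :: ls => PySem.Chars.isupper l && ls.all PySem.Chars.islower

-- ===== PRECONDITION & SPEC =====
-- Pre_ excludes only the empty string, on which A raises IndexError at token[0].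
def Pre_is_first_letter_cap (token : String) : Prop := token ≠ ""
instance (token : String) : Decidable (Pre_is_first_letter_cap token) := by
  unfold Pre_is_first_letter_cap; infer_instance
def pvWitness_is_first_letter_cap : String := "Hello"

def Spec_is_first_letter_cap (token : String) (out : Bool) : Prop := out = is_first_letter_cap_alt token
instance (token : String) (out : Bool) : Decidable (Spec_is_first_letter_cap token out) := by unfold Spec_is_first_letter_cap; infer_instance

-- ===== CLAIM (what is proved, stated in full; the proofs are below) =====
def Claim_equal_is_first_letter_cap : Prop := ∀ (token : String), Dom_is_first_letter_cap token → Pre_is_first_letter_cap token → Spec_is_first_letter_cap token (is_first_letter_cap token)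

-- ===== LEMMAS AND PROOFS =====

-- proof-only helper: the positional check B performs on the extracted letter list
def pvCheckLetters : List Char → Bool
  | [] => true
  | x :: xs => PySem.Chars.isupper x && xs.all PySem.Chars.islower

theorem digit_not_alpha (c : Char) (h : PySem.Chars.isdigit c = true) :
    PySem.Chars.isalpha c = false := by
  simp only [PySem.Chars.isdigit, Bool.and_eq_true, decide_eq_true_eq, Char.le_def,
    UInt32.le_iff_toNat_le] at h
  simp only [PySem.Chars.isalpha, PySem.Chars.isupper, PySem.Chars.islower,
    Bool.or_eq_false_iff, Bool.and_eq_false_iff, decide_eq_false_iff_not, Char.le_def,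
    UInt32.le_iff_toNat_le, not_le]
  have e9 : ('9' : Char).val.toNat = 57 := rfl
  have eA : ('A' : Char).val.toNat = 65 := rfl
  have ea : ('a' : Char).val.toNat = 97 := rfl
  rw [e9] at h; rw [eA, ea]
  omega

theorem pvALoop_true (l : List Char) :
    pvALoop l true = (l.filter PySem.Chars.isalpha).all PySem.Chars.islower := by
  induction l with
  | nil => rfl
  | cons c t ih =>
    by_cases h : PySem.Chars.isalpha c = true <;>
      by_cases h2 : PySem.Chars.islower c = true <;>
        simp [pvALoop, h, h2, ih]

theorem pvALoop_false (l : List Char) :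
    pvALoop l false = pvCheckLetters (l.filter PySem.Chars.isalpha) := by
  induction l with
  | nil => rfl
  | cons c t ih =>
    by_cases h : PySem.Chars.isalpha c = true
    · by_cases h2 : PySem.Chars.isupper c = true <;>
        simp [pvALoop, h, h2, pvALoop_true, pvCheckLetters]
    · simp [pvALoop, h, ih]

-- ===== VERDICT (by name: the statement is the Claim_ definition above) =====
theorem is_first_letter_cap_spec : Claim_equal_is_first_letter_cap := by
  intro token _ hpre
  unfold Spec_is_first_letter_cap is_first_letter_cap is_first_letter_cap_alt
  cases hl : token.toList with
  | nil =>
    exact absurd (String.toList_eq_nil_iff.mp hl) hpre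
  | cons first rest =>
    cases hd : PySem.Chars.isdigit first with
    | true =>
      simp [hd, digit_not_alpha first hd]
    | false =>
      cases rest with
      | nil =>
        cases ha : PySem.Chars.isalpha first <;>
          simp [hd, ha, PySem.Chars.strIsalpha]
      | cons c t =>
        simp only [List.isEmpty_cons, Bool.false_eq_true, if_false, pvALoop_false]
        cases hfl : (first :: c :: t).filter PySem.Chars.isalpha <;>
          simp [hd, pvCheckLetters]
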